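-- pv_equiv track=rewrite | github.com/Fondamenti18/fondamenti-di-programmazione | students/1810033/homework03/program02.py | sinistra
-- ===== SOURCE A (Python) =====
-- def colora(a,e,b,c,d):
--     for i in range(a-20,e+20):
--         for l in range(b-20,c+20):
--             d[i][l]=(0,255,0)
--     return d
--
-- def sinistra(a,b,d,e):
--     f=set()
--     w=(a,b)
--     for l in range(b-40,19,-40):
--             if d[a][l]!=(255,0,0) and d[a][l]!=(0,255,0):
--                 w=(a,l)
--                 d=colora(a,a,l,l,d)
--                 e=e+'2'
--             else :
--
--                 break
--
--     return d,w,e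
-- ===== SOURCE B (Python) =====
-- def sinistra(a, b, d, e):
--     # Phase 1: scan the ladder of step positions on the (unpainted) grid to
--     # count how many steps succeed before the first red/green cell.
--     # (Painting never touches a column that a later scan reads, so scanning
--     # first on the original grid is equivalent.)
--     k = 0
--     for l in range(b - 40, 19, -40):
--         if d[a][l] in ((255, 0, 0), (0, 255, 0)):
--             break
--         k += 1
--     if k == 0:
--         return d, (a, b), e
--     # Phase 2: paint the whole reached strip as ONE rectangle
--     # (rows a-20 .. a+19, columns lmin-20 .. b-21 = union of the 40x40 blocks).
--     lmin = b - 40 * k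
--     for i in range(a - 20, a + 20):
--         for j in range(lmin - 20, b - 20):
--             d[i][j] = (0, 255, 0)
--     return d, (a, lmin), e + '2' * k
-- ===== Notes on version B (the rewrite author's own statement) =====
-- stated objective: alternative
-- what changed: B separates boundary-finding from painting: it first scans the ladder of step positions on the untouched grid to count the reachable steps, then paints the whole reached strip as ONE rectangle and appends '2'*count at once, instead of A's interleaved per-step colora calls and string concatenations.
import Mathlib
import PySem

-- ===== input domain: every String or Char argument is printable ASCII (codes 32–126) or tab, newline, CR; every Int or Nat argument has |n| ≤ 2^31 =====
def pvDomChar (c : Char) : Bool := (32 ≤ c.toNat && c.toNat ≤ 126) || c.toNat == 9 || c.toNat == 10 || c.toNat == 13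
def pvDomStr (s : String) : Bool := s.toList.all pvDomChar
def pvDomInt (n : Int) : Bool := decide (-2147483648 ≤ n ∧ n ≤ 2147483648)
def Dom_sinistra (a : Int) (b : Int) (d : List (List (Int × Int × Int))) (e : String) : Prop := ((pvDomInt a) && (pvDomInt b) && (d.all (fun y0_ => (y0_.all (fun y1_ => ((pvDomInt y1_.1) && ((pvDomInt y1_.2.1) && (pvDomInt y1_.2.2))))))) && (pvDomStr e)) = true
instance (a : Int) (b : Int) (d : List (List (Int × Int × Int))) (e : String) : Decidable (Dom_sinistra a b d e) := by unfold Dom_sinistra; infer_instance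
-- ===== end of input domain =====

-- B separates boundary-finding from painting (scan-then-paint-one-rectangle) instead of
-- A's interleaved per-step colora calls; objective: alternative decomposition (same cost).
-- NOTE: the Python A mutates d in place; the equivalence proved here is about the RETURN
-- value (the Python B performs the same mutation of d).

-- ===== PORT A =====

-- Python `row[j] = (0,255,0)`: subscript resolution (negative index from the end) via
-- PySem.List.pyIdx?; exact for in-range indices — an out-of-range write (IndexError in
-- Python, excluded by Pre_) is modelled as a no-op.
def pvSetCol (j : Int) (row : List (Int × Int × Int)) : List (Int × Int × Int) :=
  match PySem.List.pyIdx? row.length j with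
  | some c => row.set c (0, 255, 0)
  | none => row

-- Python `d[i][j] = (0,255,0)` (same remark as pvSetCol for the row index i)
def pvWrite (d : List (List (Int × Int × Int))) (i j : Int) : List (List (Int × Int × Int)) :=
  match PySem.List.pyIdx? d.length i with
  | some r => d.modify r (pvSetCol j)
  | none => d

-- Python `d[a][l]` (read); exact for in-range (possibly negative) indices — out of
-- range (IndexError, excluded by Pre_) yields the defaults.
def pvCell (d : List (List (Int × Int × Int))) (a l : Int) : Int × Int × Int :=
  PySem.List.pyGetD (PySem.List.pyGetD d a []) l (0, 0, 0)

def colora (a e b c : Int) (d : List (List (Int × Int × Int))) : List (List (Int × Int × Int)) :=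
  (PySem.List.pyRange (a - 20) (e + 20) 1).foldl (fun d i =>
    (PySem.List.pyRange (b - 20) (c + 20) 1).foldl (fun d l => pvWrite d i l) d) d

-- A's for-loop with break, as structural recursion over the range list
def sinistraGo (a : Int) (ls : List Int) (d : List (List (Int × Int × Int)))
    (w : Int × Int) (e : String) : (List (List (Int × Int × Int))) × (Int × Int) × String :=
  match ls with
  | [] => (d, w, e)
  | l :: ls =>
    if pvCell d a l ≠ (255, 0, 0) ∧ pvCell d a l ≠ (0, 255, 0) then
      sinistraGo a ls (colora a a l l d) (a, l) (e.push '2')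
    else (d, w, e)

def sinistra (a : Int) (b : Int) (d : List (List (Int × Int × Int))) (e : String) : (List (List (Int × Int × Int))) × (Int × Int) × String :=
  sinistraGo a (PySem.List.pyRange (b - 40) 19 (-40)) d (a, b) e

-- ===== PORT B =====

-- Phase 1 of B: the counting loop with break
def pvCountFree (d : List (List (Int × Int × Int))) (a : Int) : List Int → Nat
  | [] => 0
  | l :: ls =>
    if pvCell d a l = (255, 0, 0) ∨ pvCell d a l = (0, 255, 0) then 0
    else pvCountFree d a ls + 1

def sinistra_alt (a : Int) (b : Int) (d : List (List (Int × Int × Int))) (e : String) : (List (List (Int × Int × Int))) × (Int × Int) × String :=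
  let k := pvCountFree d a (PySem.List.pyRange (b - 40) 19 (-40))
  if k = 0 then (d, (a, b), e)
  else
    let lmin := b - 40 * (k : Int)
    -- Phase 2: paint the whole reached strip as one rectangle
    let d' := (PySem.List.pyRange (a - 20) (a + 20) 1).foldl (fun d i =>
      (PySem.List.pyRange (lmin - 20) (b - 20) 1).foldl (fun d j => pvWrite d i j) d) d
    (d', (a, lmin), e.pushn '2' k)

-- ===== PRECONDITION & SPEC =====
-- Pre_ excludes exactly the inputs on which A raises IndexError: the ladder is nonempty
-- (b > 59) and either the first read d[a][b-40] is out of range (row index a outside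
-- [-len(d), len(d)) or column b-40 beyond that row), or that first cell is free (so A
-- paints) and the first 40x40 block does not fit (a painted row index outside
-- [-len(d), len(d)) or a painted row shorter than b-20).  Every input on which A returns
-- satisfies Pre_ (only the first read / first block can raise: later reads use smaller
-- columns in the same row, later blocks paint the same rows with smaller columns).
def Pre_sinistra (a : Int) (b : Int) (d : List (List (Int × Int × Int))) (e : String) : Prop :=
  b ≤ 59 ∨
  (-(d.length : Int) ≤ a ∧ a < (d.length : Int) ∧
   b - 40 < ((PySem.List.pyGetD d a []).length : Int) ∧
   (pvCell d a (b - 40) = (255, 0, 0) ∨ pvCell d a (b - 40) = (0, 255, 0) ∨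
    (-(d.length : Int) ≤ a - 20 ∧ a + 19 < (d.length : Int) ∧
     ∀ i ∈ PySem.List.pyRange (a - 20) (a + 20) 1,
       b - 20 ≤ ((PySem.List.pyGetD d i []).length : Int))))
instance (a : Int) (b : Int) (d : List (List (Int × Int × Int))) (e : String) : Decidable (Pre_sinistra a b d e) := by unfold Pre_sinistra; infer_instance

def pvWitness_sinistra : Int × Int × (List (List (Int × Int × Int))) × String := (0, 0, [], "")

def Spec_sinistra (a : Int) (b : Int) (d : List (List (Int × Int × Int))) (e : String) (out : (List (List (Int × Int × Int))) × (Int × Int) × String) : Prop := out = sinistra_alt a b d e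
instance (a : Int) (b : Int) (d : List (List (Int × Int × Int))) (e : String) (out : (List (List (Int × Int × Int))) × (Int × Int) × String) : Decidable (Spec_sinistra a b d e out) := by unfold Spec_sinistra; infer_instance

-- ===== CLAIM (what is proved, stated in full; the proofs are below) =====
def Claim_equal_sinistra : Prop := ∀ (a : Int) (b : Int) (d : List (List (Int × Int × Int))) (e : String), Dom_sinistra a b d e → Pre_sinistra a b d e → Spec_sinistra a b d e (sinistra a b d e)

-- ===== LEMMAS AND PROOFS =====

-- B's rectangle painter, as a function of the column bounds
def paintRect (a lo hi : Int) (d : List (List (Int × Int × Int))) : List (List (Int × Int × Int)) :=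
  (PySem.List.pyRange (a - 20) (a + 20) 1).foldl (fun d i =>
    (PySem.List.pyRange lo hi 1).foldl (fun d j => pvWrite d i j) d) d

def pvWriteP (d : List (List (Int × Int × Int))) (p : Int × Int) : List (List (Int × Int × Int)) :=
  pvWrite d p.1 p.2

def cellList (rows cols : List Int) : List (Int × Int) :=
  rows.flatMap fun i => cols.map fun j => (i, j)

-- ---- the countdown range with a negative step ----
lemma pyRangeNeg_nil (a b s : Int) (hs : s < 0) (h : a ≤ b) :
    PySem.List.pyRange a b s = [] := by
  unfold PySem.List.pyRange
  simp only [if_neg (show ¬ s = 0 by omega), if_neg (show ¬ 0 < s by omega),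
    if_neg (show ¬ b < a by omega)]
  simp

lemma pyRangeNeg_cons (a b s : Int) (hs : s < 0) (h : b < a) :
    PySem.List.pyRange a b s = a :: PySem.List.pyRange (a + s) b s := by
  unfold PySem.List.pyRange
  simp only [if_neg (show ¬ s = 0 by omega), if_neg (show ¬ 0 < s by omega), if_pos h]
  by_cases h2 : b < a + s
  · simp only [if_pos h2]
    have key : (a - b + -s - 1) / -s = (a + s - b + -s - 1) / -s + 1 := by
      have e1 : a - b + -s - 1 = (a + s - b + -s - 1) + 1 * (-s) := by ring
      rw [e1, Int.add_mul_ediv_right _ _ (by omega : (-s) ≠ 0)]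
    rw [key]
    have hnn : 0 ≤ (a + s - b + -s - 1) / -s :=
      Int.ediv_nonneg (by omega) (by omega)
    rw [Int.toNat_add hnn (by omega)]
    simp only [Int.toNat_one]
    rw [List.range_succ_eq_map]
    simp only [List.map_cons, List.map_map]
    refine List.cons_eq_cons.mpr ⟨by simp, ?_⟩
    apply List.map_congr_left
    intro k _
    simp [Function.comp]
    ring
  · simp only [if_neg h2]
    have h3 : 0 ≤ a - b - 1 := by omega
    have h4 : a - b - 1 < -s := by omega
    have key : (a - b + -s - 1) / -s = 1 := by
      have e1 : a - b + -s - 1 = (a - b - 1) + 1 * (-s) := by ring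
      rw [e1, Int.add_mul_ediv_right _ _ (by omega : (-s) ≠ 0),
          Int.ediv_eq_zero_of_lt h3 h4]
      omega
    rw [key]
    simp

lemma mem_pyRangeNeg (n : Nat) (a b s x : Int) (hs : s < 0) (hn : (a - b).toNat ≤ n)
    (hx : x ∈ PySem.List.pyRange a b s) : b < x ∧ x ≤ a := by
  induction n generalizing a with
  | zero =>
    rw [pyRangeNeg_nil a b s hs (by omega)] at hx
    simp at hx
  | succ n ih =>
    by_cases h : b < a
    · rw [pyRangeNeg_cons a b s hs h] at hx
      rcases List.mem_cons.mp hx with h1 | h1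
      · omega
      · have := ih (a + s) (by omega) h1
        omega
    · rw [pyRangeNeg_nil a b s hs (by omega)] at hx
      simp at hx

-- ---- the column update ----
lemma length_pvSetCol (j : Int) (row : List (Int × Int × Int)) :
    (pvSetCol j row).length = row.length := by
  unfold pvSetCol; cases PySem.List.pyIdx? row.length j <;> simp

lemma length_pvWrite (d : List (List (Int × Int × Int))) (i j : Int) :
    (pvWrite d i j).length = d.length := by
  unfold pvWrite; cases PySem.List.pyIdx? d.length i <;> simp

lemma pyGetD_pvSetCol_lt (j c : Int) (row : List (Int × Int × Int)) (x : Int × Int × Int)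
    (hc : 0 ≤ c) (hcj : c < j) :
    PySem.List.pyGetD (pvSetCol j row) c x = PySem.List.pyGetD row c x := by
  unfold pvSetCol
  cases hj : PySem.List.pyIdx? row.length j with
  | none => rfl
  | some cj =>
    have hj0 : (0:Int) ≤ j := by omega
    have hcj' : cj = j.toNat ∧ j < (row.length : Int) := by
      unfold PySem.List.pyIdx? at hj
      rw [if_pos hj0] at hj
      split_ifs at hj with h1 <;> simp_all
    unfold PySem.List.pyGetD PySem.List.pyGet?
    rw [List.length_set]
    cases hcidx : PySem.List.pyIdx? row.length c with
    | none => rfl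
    | some ck =>
      have hck : ck = c.toNat := by
        unfold PySem.List.pyIdx? at hcidx
        rw [if_pos hc] at hcidx
        split_ifs at hcidx with h1 <;> simp_all
      simp only [Option.bind_some]
      rw [List.getElem?_set_ne]
      omega

-- ---- read-stability: a write at column j > c never changes the cell read at column c ----
lemma pvCell_pvWrite_lt (d : List (List (Int × Int × Int))) (i j a c : Int)
    (hc : 0 ≤ c) (hcj : c < j) : pvCell (pvWrite d i j) a c = pvCell d a c := by
  unfold pvWrite
  cases hi : PySem.List.pyIdx? d.length i with
  | none => rfl
  | some r =>
    unfold pvCell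
    unfold PySem.List.pyGetD PySem.List.pyGet?
    rw [List.length_modify]
    cases ht : PySem.List.pyIdx? d.length a with
    | none => rfl
    | some t =>
      simp only [Option.bind_some, List.getElem?_modify]
      cases hdt : d[t]? with
      | none => simp
      | some row =>
        simp only [Option.getD_some]
        by_cases hrt : r = t
        · simp only [if_pos hrt]
          exact pyGetD_pvSetCol_lt j c row _ hc hcj
        · simp [hrt]

lemma pvCell_foldl_lt (ws : List (Int × Int)) (d : List (List (Int × Int × Int))) (a c : Int)
    (hc : 0 ≤ c) (h : ∀ p ∈ ws, c < p.2) :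
    pvCell (ws.foldl pvWriteP d) a c = pvCell d a c := by
  induction ws generalizing d with
  | nil => rfl
  | cons p ws ih =>
    simp only [List.foldl_cons]
    rw [ih _ (fun q hq => h q (List.mem_cons_of_mem _ hq))]
    exact pvCell_pvWrite_lt d p.1 p.2 a c hc (h p (List.mem_cons_self ..))

-- ---- commutation of writes (every write stores the same value) ----
lemma pvSetCol_comm (j j' : Int) (row : List (Int × Int × Int)) :
    pvSetCol j (pvSetCol j' row) = pvSetCol j' (pvSetCol j row) := by
  have E : ∀ (jj : Int) (X : List (Int × Int × Int)), X.length = row.length →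
      pvSetCol jj X = (match PySem.List.pyIdx? row.length jj with
        | some c => X.set c (0, 255, 0) | none => X) := by
    intro jj X hX; unfold pvSetCol; rw [hX]
  rw [E j _ (length_pvSetCol j' row), E j' _ (length_pvSetCol j row)]
  unfold pvSetCol
  cases hj : PySem.List.pyIdx? row.length j with
  | none =>
    cases hj' : PySem.List.pyIdx? row.length j' <;> rfl
  | some c =>
    cases hj' : PySem.List.pyIdx? row.length j' with
    | none => rfl
    | some c' =>
      dsimp only
      by_cases hcc : c = c'
      · subst hcc; simp [List.set_set]
      · exact List.set_comm _ _ (fun h => hcc h.symm)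

lemma modify_comm {α : Type} (d : List α) (r r' : Nat) (f g : α → α)
    (hfg : ∀ x, f (g x) = g (f x)) :
    (d.modify r' g).modify r f = (d.modify r f).modify r' g := by
  apply List.ext_getElem?
  intro t
  simp only [List.getElem?_modify]
  cases d[t]? with
  | none => rfl
  | some x =>
    by_cases h1 : r = t <;> by_cases h2 : r' = t <;> simp [h1, h2, hfg x]

lemma pvWrite_comm (d : List (List (Int × Int × Int))) (i j i' j' : Int) :
    pvWrite (pvWrite d i j) i' j' = pvWrite (pvWrite d i' j') i j := by
  have E : ∀ (ii jj : Int) (X : List (List (Int × Int × Int))), X.length = d.length →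
      pvWrite X ii jj = (match PySem.List.pyIdx? d.length ii with
        | some r => X.modify r (pvSetCol jj) | none => X) := by
    intro ii jj X hX; unfold pvWrite; rw [hX]
  rw [E i' j' _ (length_pvWrite d i j), E i j _ (length_pvWrite d i' j')]
  unfold pvWrite
  cases hi : PySem.List.pyIdx? d.length i with
  | none => cases hi' : PySem.List.pyIdx? d.length i' <;> rfl
  | some r =>
    cases hi' : PySem.List.pyIdx? d.length i' with
    | none => rfl
    | some r' => exact modify_comm d r' r _ _ (fun x => pvSetCol_comm j' j x)

-- ---- flattening the nested paint loops ----
lemma foldl_cellList (rows cols : List Int) (d : List (List (Int × Int × Int))) :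
    (cellList rows cols).foldl pvWriteP d =
      rows.foldl (fun d i => cols.foldl (fun d j => pvWrite d i j) d) d := by
  induction rows generalizing d with
  | nil => rfl
  | cons i rows ih =>
    simp only [cellList, List.flatMap_cons, List.foldl_append, List.foldl_cons, List.foldl_map]
    rw [← ih]; rfl

lemma cellList_append_perm (rows x y : List Int) :
    (cellList rows (x ++ y)).Perm (cellList rows x ++ cellList rows y) := by
  induction rows with
  | nil => simp [cellList]
  | cons i rows ih =>
    simp only [cellList, List.flatMap_cons, List.map_append, List.append_assoc] at *
    refine List.Perm.append_left _ ?_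
    refine (List.Perm.append_left _ ih).trans ?_
    rw [← List.append_assoc, ← List.append_assoc]
    exact List.Perm.append_right _ List.perm_append_comm

-- ---- fusion: painting the leftmost block and then the rest = painting one rectangle ----
lemma paint_fusion (a lo mid hi : Int) (h1 : lo ≤ mid) (h2 : mid ≤ hi)
    (d : List (List (Int × Int × Int))) :
    paintRect a lo mid (paintRect a mid hi d) = paintRect a lo hi d := by
  haveI : RightCommutative pvWriteP := ⟨fun b p q => pvWrite_comm b p.1 p.2 q.1 q.2⟩
  unfold paintRect
  rw [← foldl_cellList, ← foldl_cellList, ← foldl_cellList, ← List.foldl_append]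
  have hsplit := PySem.List.pyRange_one_append lo mid hi h1 h2
  have hp : (cellList (PySem.List.pyRange (a - 20) (a + 20) 1) (PySem.List.pyRange mid hi 1) ++
      cellList (PySem.List.pyRange (a - 20) (a + 20) 1) (PySem.List.pyRange lo mid 1)).Perm
      (cellList (PySem.List.pyRange (a - 20) (a + 20) 1) (PySem.List.pyRange lo hi 1)) := by
    rw [hsplit]
    exact List.perm_append_comm.trans (cellList_append_perm _ _ _).symm
  exact hp.foldl_eq d

-- ---- scan-stability: painting the block at step L does not affect any later scan ----
lemma pvCountFree_colora (a L : Int) (d : List (List (Int × Int × Int))) (ls : List Int)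
    (h : ∀ l ∈ ls, 0 ≤ l ∧ l ≤ L - 40) :
    pvCountFree (colora a a L L d) a ls = pvCountFree d a ls := by
  have hc : colora a a L L d =
      (cellList (PySem.List.pyRange (a - 20) (a + 20) 1)
        (PySem.List.pyRange (L - 20) (L + 20) 1)).foldl pvWriteP d :=
    (foldl_cellList _ _ _).symm
  induction ls with
  | nil => rfl
  | cons l ls ih =>
    simp only [pvCountFree]
    have hl := h l (List.mem_cons_self ..)
    have hcell : pvCell (colora a a L L d) a l = pvCell d a l := by
      rw [hc]
      refine pvCell_foldl_lt _ _ _ _ hl.1 ?_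
      intro p hp
      simp only [cellList, List.mem_flatMap, List.mem_map] at hp
      obtain ⟨i, _, j, hj, hpe⟩ := hp
      have hjm := PySem.List.mem_pyRange_one.mp hj
      subst hpe
      simp only
      omega
    rw [hcell, ih (fun x hx => h x (List.mem_cons_of_mem _ hx))]

lemma pushn_push (e : String) (c : Char) (k : Nat) :
    (e.push c).pushn c k = e.pushn c (k + 1) := by
  induction k with
  | zero => rfl
  | succ k ih =>
    have h1 : ∀ (s : String) (n : Nat), s.pushn c (n + 1) = (s.pushn c n).push c :=
      fun s n => rfl
    rw [h1, ih, ← h1]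

-- ---- the main induction: A's loop computed by B's two phases ----
lemma sinistra_main (a : Int) (n : Nat) : ∀ (L : Int), (L - 19).toNat ≤ n →
    ∀ (d : List (List (Int × Int × Int))) (w : Int × Int) (e : String),
    sinistraGo a (PySem.List.pyRange L 19 (-40)) d w e =
      (match pvCountFree d a (PySem.List.pyRange L 19 (-40)) with
       | 0 => (d, w, e)
       | Nat.succ s => (paintRect a (L - 40 * (s : Int) - 20) (L + 20) d,
                        (a, L - 40 * (s : Int)), e.pushn '2' (s + 1))) := by
  induction n with
  | zero =>
    intro L hL d w e
    rw [pyRangeNeg_nil L 19 (-40) (by omega) (by omega)]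
    rfl
  | succ n ih =>
    intro L hL d w e
    by_cases hL20 : L ≤ 19
    · rw [pyRangeNeg_nil L 19 (-40) (by omega) (by omega)]
      rfl
    · rw [pyRangeNeg_cons L 19 (-40) (by omega) (by omega),
        show L + (-40 : Int) = L - 40 from by ring]
      simp only [sinistraGo, pvCountFree]
      by_cases hb : pvCell d a L = (255, 0, 0) ∨ pvCell d a L = (0, 255, 0)
      · rw [if_neg (by tauto), if_pos hb]
      · have hb' := not_or.mp hb
        have hmem : ∀ l ∈ PySem.List.pyRange (L - 40) 19 (-40), 0 ≤ l ∧ l ≤ L - 40 := by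
          intro l hlm
          have := mem_pyRangeNeg (L - 40 - 19).toNat (L - 40) 19 (-40) l (by omega)
            (le_refl _) hlm
          omega
        rw [if_pos ⟨hb'.1, hb'.2⟩, if_neg hb,
          ih (L - 40) (by omega) (colora a a L L d) (a, L) (e.push '2'),
          pvCountFree_colora a L d _ hmem]
        cases hm : pvCountFree d a (PySem.List.pyRange (L - 40) 19 (-40)) with
        | zero =>
          dsimp only
          rw [show L - 40 * ((0 : Nat) : Int) - 20 = L - 20 from by norm_num,
            show L - 40 * ((0 : Nat) : Int) = L from by norm_num]
          rfl
        | succ s =>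
          dsimp only
          rw [show L - 40 * ((Nat.succ s : Nat) : Int) - 20 = L - 40 - 40 * (s : Int) - 20
              from by push_cast; ring,
            show L - 40 * ((Nat.succ s : Nat) : Int) = L - 40 - 40 * (s : Int)
              from by push_cast; ring,
            show L - 40 + 20 = L - 20 from by ring]
          rw [show colora a a L L d = paintRect a (L - 20) (L + 20) d from rfl]
          rw [paint_fusion a (L - 40 - 40 * (s : Int) - 20) (L - 20) (L + 20)
            (by omega) (by omega) d]
          rw [pushn_push]

-- ===== VERDICT (by name: the statement is the Claim_ definition above) =====
theorem sinistra_spec : Claim_equal_sinistra := by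
  unfold Claim_equal_sinistra
  intro a b d e _ _
  unfold Spec_sinistra sinistra sinistra_alt
  rw [sinistra_main a (b - 40 - 19).toNat (b - 40) (le_refl _) d (a, b) e]
  cases hm : pvCountFree d a (PySem.List.pyRange (b - 40) 19 (-40)) with
  | zero => simp
  | succ s =>
    rw [if_neg (by omega)]
    dsimp only
    rw [show b - 40 * ((Nat.succ s : Nat) : Int) - 20 = b - 40 - 40 * (s : Int) - 20
        from by push_cast; ring,
      show b - 40 * ((Nat.succ s : Nat) : Int) = b - 40 - 40 * (s : Int)
        from by push_cast; ring,
      show b - 40 + 20 = b - 20 from by ring]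
    rfl
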